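-- pv_equiv track=rewrite | github.com/Tigatok/aoc2022 | day8/day8.py | getPerimiterTrees
-- ===== SOURCE A (Python) =====
-- def getPerimiterTrees(mapSize):
--     perimiterTrees = 0
--
--     # Loop over all the rows
--     for x in range(mapSize):
--         # Loop over all the columns
--         for y in range(mapSize):
--             if (
--                 x == 0 or
--                 y == 0 or
--                 y == mapSize-1 or
--                 x == mapSize-1
--             ):
--                 perimiterTrees += 1
--     return int(perimiterTrees)
-- ===== SOURCE B (Python) =====
-- def getPerimiterTrees(mapSize):
--     # Closed form: an n x n grid has 4n-4 perimeter cells for n >= 2,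
--     # 1 for n == 1, and 0 for n <= 0.
--     if mapSize <= 0:
--         return 0
--     if mapSize == 1:
--         return 1
--     return 4 * mapSize - 4
-- ===== Notes on version B (the rewrite author's own statement) =====
-- stated objective: faster
-- what changed: Replaced the O(n^2) double loop that counts border cells one by one with the closed form 4n-4 (with the n<=0 and n==1 corners handled directly).
import Mathlib
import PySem

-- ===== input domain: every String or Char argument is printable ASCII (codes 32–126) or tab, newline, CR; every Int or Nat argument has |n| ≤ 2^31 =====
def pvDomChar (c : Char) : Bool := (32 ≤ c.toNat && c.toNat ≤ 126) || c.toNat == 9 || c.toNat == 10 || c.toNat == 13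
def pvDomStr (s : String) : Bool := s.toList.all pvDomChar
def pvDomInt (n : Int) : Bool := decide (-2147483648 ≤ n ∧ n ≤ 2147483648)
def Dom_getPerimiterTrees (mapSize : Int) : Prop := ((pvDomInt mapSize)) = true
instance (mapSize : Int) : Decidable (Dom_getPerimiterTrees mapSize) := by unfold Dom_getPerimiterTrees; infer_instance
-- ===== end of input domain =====

-- B replaces A's O(n^2) double loop over the grid with the closed form 4n-4 (objective: faster, asymptotic).


-- ===== PORT A =====
-- Literal port of A: nested loops over range(mapSize), counting border cells one by one.
def getPerimiterTrees (mapSize : Int) : Int :=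
  (PySem.List.pyRange 0 mapSize 1).foldl (fun acc x =>
    (PySem.List.pyRange 0 mapSize 1).foldl (fun acc2 y =>
      if x = 0 ∨ y = 0 ∨ y = mapSize - 1 ∨ x = mapSize - 1 then acc2 + 1 else acc2) acc) 0

-- ===== PORT B =====
-- Literal port of B: closed form.
def getPerimiterTrees_alt (mapSize : Int) : Int :=
  if mapSize ≤ 0 then 0
  else if mapSize = 1 then 1
  else 4 * mapSize - 4

-- ===== PRECONDITION & SPEC =====
def Spec_getPerimiterTrees (mapSize : Int) (out : Int) : Prop := out = getPerimiterTrees_alt mapSize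
instance (mapSize : Int) (out : Int) : Decidable (Spec_getPerimiterTrees mapSize out) := by unfold Spec_getPerimiterTrees; infer_instance

-- ===== CLAIM (what is proved, stated in full; the proofs are below) =====
def Claim_equal_getPerimiterTrees : Prop := ∀ (mapSize : Int), Dom_getPerimiterTrees mapSize → Spec_getPerimiterTrees mapSize (getPerimiterTrees mapSize)

-- ===== LEMMAS AND PROOFS =====

-- The inner loop for a boundary row (x = 0 or x = n-1): every y counts, adding n.
theorem pv_inner_all (n : Int) (hn : 0 ≤ n) (x : Int) (hx : x = 0 ∨ x = n - 1) (acc : Int) :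
    (PySem.List.pyRange 0 n 1).foldl (fun acc2 y =>
      if x = 0 ∨ y = 0 ∨ y = n - 1 ∨ x = n - 1 then acc2 + 1 else acc2) acc = acc + n := by
  rw [PySem.List.foldl_congr_mem _ _ (fun acc2 _ => acc2 + (1:Int)) acc
      (by intro a y _; rcases hx with h | h <;> simp [h])]
  rw [PySem.List.foldl_add]
  simp [PySem.List.length_pyRange_one]
  omega

-- The inner loop for a middle row (0 < x < n-1): only y = 0 and y = n-1 count, adding 2.
theorem pv_inner_mid (n : Int) (x : Int) (hx0 : 0 < x) (hx1 : x < n - 1) (acc : Int) :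
    (PySem.List.pyRange 0 n 1).foldl (fun acc2 y =>
      if x = 0 ∨ y = 0 ∨ y = n - 1 ∨ x = n - 1 then acc2 + 1 else acc2) acc = acc + 2 := by
  have h2 : (2:Int) ≤ n := by omega
  have hsplit : PySem.List.pyRange 0 n 1
      = 0 :: (PySem.List.pyRange 1 (n - 1) 1 ++ [n - 1]) := by
    rw [PySem.List.pyRange_one_cons (by omega : (0:Int) < n)]
    have h := PySem.List.pyRange_one_succ_right (a := 1) (b := n - 1) (by omega)
    have hn1 : n - 1 + 1 = n := by omega
    rw [hn1] at h
    norm_num [h]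
  rw [hsplit]
  simp only [List.foldl_cons, List.foldl_append, List.foldl_nil]
  have hmid : (PySem.List.pyRange 1 (n - 1) 1).foldl (fun acc2 y =>
      if x = 0 ∨ y = 0 ∨ y = n - 1 ∨ x = n - 1 then acc2 + 1 else acc2) (acc + 1)
      = acc + 1 := by
    rw [PySem.List.foldl_congr_mem _ _ (fun acc2 _ => acc2) (acc + 1)
        (by intro a y hy
            rw [PySem.List.mem_pyRange_one] at hy
            have : ¬ (x = 0 ∨ y = 0 ∨ y = n - 1 ∨ x = n - 1) := by omega
            simp [this])]
    simp
  simp only [true_or, or_true, if_true]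
  rw [hmid]
  omega

-- The outer loop, abstracted over the row function g.
theorem pv_outer (n : Int) (hn : 2 ≤ n) (g : Int → Int → Int)
    (hb : ∀ (acc x : Int), (x = 0 ∨ x = n - 1) → g acc x = acc + n)
    (hm : ∀ (acc x : Int), 0 < x → x < n - 1 → g acc x = acc + 2) :
    (PySem.List.pyRange 0 n 1).foldl g 0 = 4 * n - 4 := by
  have hsplit : PySem.List.pyRange 0 n 1
      = 0 :: (PySem.List.pyRange 1 (n - 1) 1 ++ [n - 1]) := by
    rw [PySem.List.pyRange_one_cons (by omega : (0:Int) < n)]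
    have h := PySem.List.pyRange_one_succ_right (a := 1) (b := n - 1) (by omega)
    have hn1 : n - 1 + 1 = n := by omega
    rw [hn1] at h
    norm_num [h]
  rw [hsplit]
  simp only [List.foldl_cons, List.foldl_append, List.foldl_nil]
  rw [hb 0 0 (Or.inl rfl)]
  rw [PySem.List.foldl_congr_mem _ _ (fun acc _ => acc + (2:Int)) (0 + n)
      (by intro a x hx
          rw [PySem.List.mem_pyRange_one] at hx
          exact hm a x (by omega) (by omega))]
  rw [PySem.List.foldl_add]
  rw [hb _ (n - 1) (Or.inr rfl)]
  simp [PySem.List.length_pyRange_one]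
  omega

theorem pv_closed (n : Int) (hn : 2 ≤ n) : getPerimiterTrees n = 4 * n - 4 := by
  unfold getPerimiterTrees
  exact pv_outer n hn _
    (fun acc x hx => pv_inner_all n (by omega) x hx acc)
    (fun acc x h1 h2 => pv_inner_mid n x h1 h2 acc)

-- ===== VERDICT (by name: the statement is the Claim_ definition above) =====
theorem getPerimiterTrees_spec : Claim_equal_getPerimiterTrees := by
  intro n _
  unfold Spec_getPerimiterTrees getPerimiterTrees_alt
  by_cases h0 : n ≤ 0
  · simp [getPerimiterTrees, PySem.List.pyRange_one_eq_nil h0, h0]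
  · by_cases h1 : n = 1
    · subst h1; decide
    · have h2 : 2 ≤ n := by omega
      rw [pv_closed n h2]
      simp [h0, h1]
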